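-- pv_equiv track=rewrite | github.com/adamgiffordphd/exercise_prediction | src/data/make_dataset.py | _get_first_subjs_match_crit
-- ===== SOURCE A (Python) =====
-- from typing import DefaultDict, Dict, Generator, List, Tuple, Union
--
-- def _get_first_subjs_match_crit(
--     files_dict: DefaultDict[str, list], n_sing_file: int, n_double_file: int
-- ) -> list:
--     """
--     It takes a dictionary of subject IDs and a list of files associated with each subject
--     ID, and returns a list of the first "n" subject IDs that match the criteria of having
--     either one (`n_sing_file`) or two (`n_double_file`) data files associated with them
--
--     Args:
--       files_dict (DefaultDict[str, list]): a dictionary of subject IDs and the list of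
--       file ids they have.
--       n_sing_file (int): number of subjects with only one file to include in the test
--       dataset
--       n_double_file (int): number of subjects with two files to include in the test
--       dataset
--
--     Returns:
--       A list of the first subject IDs that match the criteria.
--     """
--     test_subj_ids = []
--     ones_left = n_sing_file
--     twos_left = n_double_file
--     for key, val in files_dict.items():
--         if not (ones_left or twos_left):
--             break
--
--         if (len(val) == 1) & (ones_left > 0):
--             test_subj_ids.append(key)
--             ones_left -= 1
--         elif (len(val) == 2) & (twos_left > 0):
--             test_subj_ids.append(key)
--             twos_left -= 1
--
--     return test_subj_ids
-- ===== SOURCE B (Python) =====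
-- def _get_first_subjs_match_crit(files_dict, n_sing_file, n_double_file):
--     items = list(files_dict.items())
--
--     def _picked(i, val):
--         if len(val) == 1:
--             return sum(1 for _, w in items[:i] if len(w) == 1) < n_sing_file
--         if len(val) == 2:
--             return sum(1 for _, w in items[:i] if len(w) == 2) < n_double_file
--         return False
--
--     return [key for i, (key, val) in enumerate(items) if _picked(i, val)]
-- ===== Notes on version B (the rewrite author's own statement) =====
-- stated objective: alternative
-- what changed: Replaces A's stateful countdown loop with a declarative comprehension: an item is selected iff its kind (one or two files) has a prefix count of same-kind items below the respective quota; no mutable counters or break.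
import Mathlib
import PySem

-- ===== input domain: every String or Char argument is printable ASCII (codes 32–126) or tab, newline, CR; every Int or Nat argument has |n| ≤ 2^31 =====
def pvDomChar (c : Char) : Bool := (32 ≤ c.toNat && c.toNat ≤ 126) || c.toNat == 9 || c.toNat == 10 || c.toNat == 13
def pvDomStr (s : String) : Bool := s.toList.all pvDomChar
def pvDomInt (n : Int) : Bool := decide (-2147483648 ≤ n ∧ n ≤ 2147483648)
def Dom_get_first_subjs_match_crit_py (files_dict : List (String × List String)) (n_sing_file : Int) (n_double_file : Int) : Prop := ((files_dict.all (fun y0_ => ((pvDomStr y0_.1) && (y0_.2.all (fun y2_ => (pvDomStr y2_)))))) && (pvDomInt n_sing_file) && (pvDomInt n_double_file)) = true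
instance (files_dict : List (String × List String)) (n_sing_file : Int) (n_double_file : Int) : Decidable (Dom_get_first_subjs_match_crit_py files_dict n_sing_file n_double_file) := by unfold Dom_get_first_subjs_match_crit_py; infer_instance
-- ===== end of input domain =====

-- B replaces A's stateful countdown loop with a declarative prefix-count comprehension (alternative decomposition, same result).


-- ===== PORT A =====
def pvLoopA : List (String × List String) → Int → Int → List String
  | [], _, _ => []
  | (key, val) :: rest, ones_left, twos_left =>
    if ones_left = 0 ∧ twos_left = 0 then []
    else if val.length = 1 ∧ 0 < ones_left then key :: pvLoopA rest (ones_left - 1) twos_left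
    else if val.length = 2 ∧ 0 < twos_left then key :: pvLoopA rest ones_left (twos_left - 1)
    else pvLoopA rest ones_left twos_left

def get_first_subjs_match_crit_py (files_dict : List (String × List String)) (n_sing_file : Int) (n_double_file : Int) : List String :=
  pvLoopA files_dict n_sing_file n_double_file


-- ===== PORT B =====
-- B helper: _picked(i, val) — prefix count of same-kind items below the quota
def pvPicked (items : List (String × List String)) (n_sing_file n_double_file : Int) (i : Int) (val : List String) : Bool :=
  if val.length = 1 then
    decide ((((PySem.List.slice items none (some i)).filter (fun q => q.2.length == 1)).length : Int) < n_sing_file)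
  else if val.length = 2 then
    decide ((((PySem.List.slice items none (some i)).filter (fun q => q.2.length == 2)).length : Int) < n_double_file)
  else false

def get_first_subjs_match_crit_py_alt (files_dict : List (String × List String)) (n_sing_file : Int) (n_double_file : Int) : List String :=
  ((PySem.List.enumerate files_dict 0).filter
      (fun p => pvPicked files_dict n_sing_file n_double_file p.1 p.2.2)).map (fun p => p.2.1)


-- ===== PRECONDITION & SPEC =====
def Spec_get_first_subjs_match_crit_py (files_dict : List (String × List String)) (n_sing_file : Int) (n_double_file : Int) (out : List String) : Prop := out = get_first_subjs_match_crit_py_alt files_dict n_sing_file n_double_file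
instance (files_dict : List (String × List String)) (n_sing_file : Int) (n_double_file : Int) (out : List String) : Decidable (Spec_get_first_subjs_match_crit_py files_dict n_sing_file n_double_file out) := by unfold Spec_get_first_subjs_match_crit_py; infer_instance

-- ===== CLAIM (what is proved, stated in full; the proofs are below) =====
def Claim_equal_get_first_subjs_match_crit_py : Prop := ∀ (files_dict : List (String × List String)) (n_sing_file : Int) (n_double_file : Int), Dom_get_first_subjs_match_crit_py files_dict n_sing_file n_double_file → Spec_get_first_subjs_match_crit_py files_dict n_sing_file n_double_file (get_first_subjs_match_crit_py files_dict n_sing_file n_double_file)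

-- ===== LEMMAS AND PROOFS =====

lemma pv_enum_shift {α : Type} (xs : List α) (s : Int) :
    PySem.List.enumerate xs (s + 1) = (PySem.List.enumerate xs s).map (fun p => (p.1 + 1, p.2)) := by
  induction xs generalizing s with
  | nil => simp [PySem.List.enumerate_nil]
  | cons a xs ih =>
    rw [PySem.List.enumerate_cons, PySem.List.enumerate_cons, List.map_cons]
    rw [show s + 1 + 1 = (s + 1) + 1 from rfl, ih (s + 1)]

lemma pv_alt_negS (xs : List (String × List String)) (nS nS' nD : Int)
    (hS : nS ≤ 0) (hS' : nS' ≤ 0) :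
    get_first_subjs_match_crit_py_alt xs nS nD = get_first_subjs_match_crit_py_alt xs nS' nD := by
  unfold get_first_subjs_match_crit_py_alt
  congr 1
  apply List.filter_congr
  intro p _
  unfold pvPicked
  split_ifs
  · simp; omega
  · rfl
  · rfl

lemma pv_alt_negD (xs : List (String × List String)) (nS nD nD' : Int)
    (hD : nD ≤ 0) (hD' : nD' ≤ 0) :
    get_first_subjs_match_crit_py_alt xs nS nD = get_first_subjs_match_crit_py_alt xs nS nD' := by
  unfold get_first_subjs_match_crit_py_alt
  congr 1
  apply List.filter_congr
  intro p _
  unfold pvPicked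
  split_ifs
  · rfl
  · simp; omega
  · rfl

lemma pv_alt_nonpos (xs : List (String × List String)) (nS nD : Int)
    (hS : nS ≤ 0) (hD : nD ≤ 0) :
    get_first_subjs_match_crit_py_alt xs nS nD = [] := by
  unfold get_first_subjs_match_crit_py_alt
  rw [List.filter_eq_nil_iff.mpr, List.map_nil]
  intro p _
  unfold pvPicked
  split_ifs
  · simp; omega
  · simp; omega
  · simp

lemma pv_alt_cons (key : String) (val : List String) (rest : List (String × List String)) (nS nD : Int) :
    get_first_subjs_match_crit_py_alt ((key, val) :: rest) nS nD =
      (if (val.length = 1 ∧ 0 < nS) ∨ (val.length = 2 ∧ 0 < nD) then [key] else []) ++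
        get_first_subjs_match_crit_py_alt rest
          (nS - (if val.length = 1 then 1 else 0)) (nD - (if val.length = 2 then 1 else 0)) := by
  have hcongr : List.filter (fun p : Int × (String × List String) => pvPicked ((key, val) :: rest) nS nD (p.1 + 1) p.2.2) (PySem.List.enumerate rest 0)
      = List.filter (fun p => pvPicked rest (nS - (if val.length = 1 then 1 else 0)) (nD - (if val.length = 2 then 1 else 0)) p.1 p.2.2) (PySem.List.enumerate rest 0) := by
    apply List.filter_congr
    intro p hp
    obtain ⟨k, hk, rfl⟩ := (PySem.List.mem_enumerate_iff _ _ _).mp hp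
    unfold pvPicked
    dsimp only
    have h2 : PySem.List.slice rest none (some ((0 : Int) + (k : Int))) = List.take k rest := by
      rw [show ((0 : Int) + (k : Int)) = ((k : Nat) : Int) by omega, PySem.List.slice_to_natCast]
    have h1 : PySem.List.slice ((key, val) :: rest) none (some ((0 : Int) + (k : Int) + 1)) = (key, val) :: List.take k rest := by
      rw [show ((0 : Int) + (k : Int) + 1) = ((k + 1 : Nat) : Int) by omega, PySem.List.slice_to_natCast]
      simp [List.take_succ_cons]
    rw [h1, h2]
    by_cases hv1 : val.length = 1
    · rw [if_pos hv1, if_neg (show ¬ val.length = 2 by omega)]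
      simp only [List.filter_cons]
      rw [if_pos (show (val.length == 1) = true by simp [hv1]),
          if_neg (show ¬ (val.length == 2) = true by simp; omega)]
      split_ifs with hy1 hy2
      · simp [decide_eq_decide]
        omega
      · simp
      · rfl
    · by_cases hv2 : val.length = 2
      · rw [if_neg hv1, if_pos hv2]
        simp only [List.filter_cons]
        rw [if_neg (show ¬ (val.length == 1) = true by simp [hv1]),
            if_pos (show (val.length == 2) = true by simp [hv2])]
        split_ifs with hy1 hy2
        · simp
        · simp [decide_eq_decide]
          omega
        · rfl
      · rw [if_neg hv1, if_neg hv2]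
        simp only [List.filter_cons]
        rw [if_neg (show ¬ (val.length == 1) = true by simp [hv1]),
            if_neg (show ¬ (val.length == 2) = true by simp [hv2])]
        simp
  have hhead : pvPicked ((key, val) :: rest) nS nD 0 val =
      decide ((val.length = 1 ∧ 0 < nS) ∨ (val.length = 2 ∧ 0 < nD)) := by
    unfold pvPicked
    have h0 : PySem.List.slice ((key, val) :: rest) none (some (0 : Int)) = ([] : List (String × List String)) := by
      rw [show ((0 : Int)) = ((0 : Nat) : Int) from rfl, PySem.List.slice_to_natCast]; rfl
    rw [h0]
    split_ifs with h1 h2 <;> simp_all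
  have htail : List.map (fun p : Int × (String × List String) => p.2.1)
      (List.filter (fun p => pvPicked ((key, val) :: rest) nS nD p.1 p.2.2)
        (List.map (fun p : Int × (String × List String) => (p.1 + 1, p.2)) (PySem.List.enumerate rest 0)))
      = get_first_subjs_match_crit_py_alt rest
          (nS - (if val.length = 1 then 1 else 0)) (nD - (if val.length = 2 then 1 else 0)) := by
    rw [List.filter_map, List.map_map]
    rw [show List.filter ((fun p : Int × (String × List String) => pvPicked ((key, val) :: rest) nS nD p.1 p.2.2) ∘ (fun p : Int × (String × List String) => (p.1 + 1, p.2))) (PySem.List.enumerate rest 0)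
        = List.filter (fun p : Int × (String × List String) => pvPicked ((key, val) :: rest) nS nD (p.1 + 1) p.2.2) (PySem.List.enumerate rest 0) from rfl]
    rw [hcongr]
    rfl
  conv_lhs => unfold get_first_subjs_match_crit_py_alt
  rw [PySem.List.enumerate_cons, pv_enum_shift, List.filter_cons]
  by_cases hpick : (val.length = 1 ∧ 0 < nS) ∨ (val.length = 2 ∧ 0 < nD)
  · rw [if_pos (by simp [hhead, hpick]), if_pos hpick, List.map_cons, htail]
    rfl
  · rw [if_neg (by simp [hhead, hpick]), if_neg hpick, htail]
    rfl

lemma pv_main (xs : List (String × List String)) (nS nD : Int) :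
    pvLoopA xs nS nD = get_first_subjs_match_crit_py_alt xs nS nD := by
  induction xs generalizing nS nD with
  | nil => simp [pvLoopA, get_first_subjs_match_crit_py_alt, PySem.List.enumerate_nil]
  | cons x rest ih =>
    obtain ⟨key, val⟩ := x
    rw [pv_alt_cons]
    by_cases hz : nS = 0 ∧ nD = 0
    · -- both counters are exactly 0: A breaks immediately; B selects nothing anywhere
      obtain ⟨rfl, rfl⟩ := hz
      rw [show pvLoopA ((key, val) :: rest) 0 0 = [] from by rw [pvLoopA]; simp]
      rw [if_neg (by omega : ¬ ((val.length = 1 ∧ (0:Int) < 0) ∨ (val.length = 2 ∧ (0:Int) < 0)))]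
      rw [pv_alt_nonpos rest _ _ (by split_ifs <;> omega) (by split_ifs <;> omega)]
      rfl
    · by_cases h1 : val.length = 1 ∧ 0 < nS
      · -- head is a single and single-quota available
        rw [show pvLoopA ((key, val) :: rest) nS nD = key :: pvLoopA rest (nS - 1) nD from by
          rw [pvLoopA]; rw [if_neg hz, if_pos h1]]
        rw [if_pos (Or.inl h1), if_pos h1.1, if_neg (by omega : ¬ val.length = 2), ih]
        simp
      · by_cases h2 : val.length = 2 ∧ 0 < nD
        · -- head is a double and double-quota available
          rw [show pvLoopA ((key, val) :: rest) nS nD = key :: pvLoopA rest nS (nD - 1) from by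
            rw [pvLoopA]; rw [if_neg hz, if_neg h1, if_pos h2]]
          rw [if_pos (Or.inr h2), if_neg (by omega : ¬ val.length = 1), if_pos h2.1, ih]
          simp
        · -- head not taken
          rw [show pvLoopA ((key, val) :: rest) nS nD = pvLoopA rest nS nD from by
            rw [pvLoopA]; rw [if_neg hz, if_neg h1, if_neg h2]]
          rw [if_neg (by tauto), ih, List.nil_append]
          by_cases hv1 : val.length = 1
          · rw [if_pos hv1, if_neg (by omega : ¬ val.length = 2)]
            have hSle : nS ≤ 0 := by by_contra hc; exact h1 ⟨hv1, by omega⟩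
            rw [pv_alt_negS rest nS (nS - 1) nD hSle (by omega)]
            norm_num
          · rw [if_neg hv1]
            by_cases hv2 : val.length = 2
            · rw [if_pos hv2]
              have hDle : nD ≤ 0 := by by_contra hc; exact h2 ⟨hv2, by omega⟩
              rw [pv_alt_negD rest nS nD (nD - 1) hDle (by omega)]
              norm_num
            · rw [if_neg hv2]
              norm_num

-- ===== VERDICT (by name: the statement is the Claim_ definition above) =====
theorem get_first_subjs_match_crit_py_spec : Claim_equal_get_first_subjs_match_crit_py := by
  intro files_dict n_sing_file n_double_file _
  unfold Spec_get_first_subjs_match_crit_py get_first_subjs_match_crit_py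
  exact pv_main files_dict n_sing_file n_double_file
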